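-- pv_equiv track=rewrite | github.com/czaky/puzzles | packing.py | walls_coloring
-- ===== SOURCE A (Python) =====
-- from heapq import nsmallest
-- from typing import List
--
-- def walls_coloring(cost: List[List[int]]) -> int:
--     """Given N walls, paint those using K colors, reducing cost from the `cost` matrix.
--
--     The restriction here is that two walls next to each other
--     have to be painted differently.
--
--     Args:
--         cost (List[List[int]]): NxK cost matrix
--
--     Returns:
--         int: the minium cost to paint the walls.
--     """
--     # Shortcuts:
--     if len(cost) == 0 or len(cost[0]) == 0:
--         return -1
--     if len(cost[0]) == 1:
--         # If there is only 1 color, it is impossible to alternate colors between walls.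
--         return cost[0][0] if len(cost) == 1 else -1
--
--     # This is a knapsack problem and can be solved using dynamic programming.
--     # The first idea is to create a `dp[w][p]` matrix and fill it up
--     # left-to-right, starting at the left wall. This approach is `O(N*K*K)`.
--     # In that approach we calculate the minimum over `dp[w-1][k]` for all
--     # values except the one that was used to paint in the previous iteration.
--     #
--     # An optimization is to realize that `dp[w-1]` contains all the values from
--     # the previous pass and the `min(dp[w-1])` is the minimum for the previously
--     # chosen color.
--     #
--     # Thus the solution is to calculate the two smallest numbers form `dp[w-1]`
--     # and use those alternatively depending which color was chosen.
--     # Given that we only iterate over the walls and then over colors,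
--     # the time complexity is `O(N*K)`
--     # and space required is `O(1)`.
--
--     # Use two smallest numbers (for the firs wall).
--     # The `m1` and `m2` variables store (<cost-so-far>, <previous-color>)
--     m1, m2 = nsmallest(2, ((cs, c) for c, cs in enumerate(cost[0])))
--     # Depending on the current color `c`, choose the minimum value to add.
--     # This makes sure that we don't paint walls next to each other with the same color.
--     mn = lambda c: m1[0] if m1[1] != c else m2[0]
--     for w in range(1, len(cost)):
--         # Recalculate the two smallest cost numbers for this wall.
--         # `cs + mn(c)` - chooses the cost of the paint, while alternating the colors.
--         m1, m2 = nsmallest(2, ((cs + mn(c), c) for c, cs in enumerate(cost[w])))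
--     # Return the lowest cost.
--     return m1[0]
-- ===== SOURCE B (Python) =====
-- from typing import List
--
-- def walls_coloring(cost: List[List[int]]) -> int:
--     if len(cost) == 0 or len(cost[0]) == 0:
--         return -1
--     if len(cost[0]) == 1:
--         return cost[0][0] if len(cost) == 1 else -1
--     prev = list(cost[0])
--     for row in cost[1:]:
--         prev = [row[c] + min(prev[j] for j in range(len(prev)) if j != c)
--                 for c in range(len(row))]
--     return min(prev)
-- ===== Notes on version B (the rewrite author's own statement) =====
-- stated objective: simpler
-- what changed: Replaces A's two-smallest (value,color) pair tracking via heapq.nsmallest with the plain O(N*K^2) DP that keeps the whole per-color cost row and rescans it, taking min over all other colors for each color.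
import Mathlib
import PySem

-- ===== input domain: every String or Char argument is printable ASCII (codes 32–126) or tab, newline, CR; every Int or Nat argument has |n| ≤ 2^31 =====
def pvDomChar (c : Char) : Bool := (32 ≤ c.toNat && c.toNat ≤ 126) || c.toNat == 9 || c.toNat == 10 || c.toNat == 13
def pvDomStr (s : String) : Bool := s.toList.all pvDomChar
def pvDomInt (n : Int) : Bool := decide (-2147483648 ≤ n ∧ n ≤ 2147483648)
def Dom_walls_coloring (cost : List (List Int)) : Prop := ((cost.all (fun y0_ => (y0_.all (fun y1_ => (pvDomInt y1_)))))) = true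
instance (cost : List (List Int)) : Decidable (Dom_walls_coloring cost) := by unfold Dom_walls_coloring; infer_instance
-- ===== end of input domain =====

-- B replaces A's two-smallest (value,color) bookkeeping (heapq.nsmallest) by the plain DP that
-- keeps the whole per-color cost row and rescans it for the min over the other colors (simpler, O(N*K^2)).

-- ===== PORT A =====
-- (value, color) pairs of a row: ((cs, c) for c, cs in enumerate(row))
def pvPairs (xs : List Int) : List (Int × Int) :=
  (PySem.List.enumerate xs).map (fun p => (p.2, p.1))

-- nsmallest(2, ps) unpacked into (m1, m2); Python raises on fewer than 2 items (outside Pre_)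
def pvTwoSmallest (ps : List (Int × Int)) : (Int × Int) × (Int × Int) :=
  match PySem.List.sorted2 ps Prod.fst Prod.snd with
  | a :: b :: _ => (a, b)
  | _ => ((0, 0), (0, 0))   -- unreachable under Pre_ (Python raises ValueError there)

def walls_coloring (cost : List (List Int)) : Int :=
  if cost.length == 0 || cost.headI.length == 0 then -1
  else if cost.headI.length == 1 then
    (if cost.length == 1 then cost.headI.headI else -1)
  else
    ((PySem.List.pyRange 1 cost.length 1).foldl
      (fun m w =>
        pvTwoSmallest ((PySem.List.enumerate (PySem.List.pyGetD cost w [])).map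
          (fun p => (p.2 + (if m.1.2 ≠ p.1 then m.1.1 else m.2.1), p.1))))
      (pvTwoSmallest (pvPairs cost.headI))).1.1

-- ===== PORT B =====
-- min(prev[j] for j in range(len(prev)) if j != c); Python raises on an empty generator (outside Pre_)
def pvMinOther (prev : List Int) (c : Int) : Int :=
  (PySem.List.min? (((PySem.List.pyRange 0 prev.length 1).filter (fun j => j ≠ c)).map
      (fun j => PySem.List.pyGetD prev j 0)) (fun x => x)).getD 0

def walls_coloring_alt (cost : List (List Int)) : Int :=
  if cost.length == 0 || cost.headI.length == 0 then -1
  else if cost.headI.length == 1 then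
    (if cost.length == 1 then cost.headI.headI else -1)
  else
    (PySem.List.min?
      ((PySem.List.slice cost (some 1) none).foldl
        (fun prev row =>
          (PySem.List.pyRange 0 row.length 1).map
            (fun c => PySem.List.pyGetD row c 0 + pvMinOther prev c))
        cost.headI)
      (fun x => x)).getD 0

-- ===== PRECONDITION & SPEC =====
-- Pre_ excludes exactly the inputs where A raises ValueError: at least two colors in the first
-- row but some row with fewer than two entries (nsmallest(2, …) then cannot be unpacked).
def Pre_walls_coloring (cost : List (List Int)) : Prop :=
  cost = [] ∨ cost.headI.length ≤ 1 ∨ ∀ r ∈ cost, 2 ≤ r.length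
instance (cost : List (List Int)) : Decidable (Pre_walls_coloring cost) := by unfold Pre_walls_coloring; infer_instance
def pvWitness_walls_coloring : List (List Int) := [[1, 2], [3, 4]]

def Spec_walls_coloring (cost : List (List Int)) (out : Int) : Prop := out = walls_coloring_alt cost
instance (cost : List (List Int)) (out : Int) : Decidable (Spec_walls_coloring cost out) := by unfold Spec_walls_coloring; infer_instance

-- ===== CLAIM (what is proved, stated in full; the proofs are below) =====
def Claim_equal_walls_coloring : Prop := ∀ (cost : List (List Int)), Dom_walls_coloring cost → Pre_walls_coloring cost → Spec_walls_coloring cost (walls_coloring cost)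

-- ===== LEMMAS AND PROOFS =====

-- the strict lexicographic Bool comparison sorted2 uses on (value, color) pairs
def pvLexB (p q : Int × Int) : Bool :=
  decide (p.1 < q.1) || (!decide (q.1 < p.1) && decide (p.2 < q.2))

-- "q is not strictly before p", i.e. p ≤lex q
def pvR (p q : Int × Int) : Prop := pvLexB q p = false

theorem pvSorted2_eq_foldl (ps : List (Int × Int)) :
    PySem.List.sorted2 ps Prod.fst Prod.snd =
      ps.foldl (fun acc x => PySem.List.insertBy pvLexB x acc) [] := rfl

theorem pvLexB_iff (p q : Int × Int) :
    pvLexB p q = true ↔ (p.1 < q.1 ∨ (p.1 = q.1 ∧ p.2 < q.2)) := by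
  simp [pvLexB]; omega

theorem pvR_iff (p q : Int × Int) :
    pvR p q ↔ (p.1 < q.1 ∨ (p.1 = q.1 ∧ p.2 ≤ q.2)) := by
  simp [pvR, pvLexB]; omega

theorem pvPairwise_insertBy (x : Int × Int) (l : List (Int × Int)) (h : l.Pairwise pvR) :
    (PySem.List.insertBy pvLexB x l).Pairwise pvR := by
  induction l with
  | nil => simp [PySem.List.insertBy, pvR_iff]
  | cons y ys ih =>
    rw [List.pairwise_cons] at h
    by_cases hxy : pvLexB x y = true
    · rw [pvLexB_iff] at hxy
      simp only [PySem.List.insertBy, (pvLexB_iff x y).mpr hxy, if_pos]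
      refine List.Pairwise.cons (fun z hz => ?_) (List.Pairwise.cons h.1 h.2)
      rcases List.mem_cons.mp hz with rfl | hz
      · rw [pvR_iff]; omega
      · have hyz := (pvR_iff _ _).mp (h.1 _ hz)
        rw [pvR_iff]; omega
    · simp only [PySem.List.insertBy, hxy, Bool.false_eq_true, if_neg, not_false_iff]
      refine List.Pairwise.cons (fun z hz => ?_) (ih h.2)
      rcases (PySem.List.mem_insertBy _ _ _ _).mp hz with rfl | hz
      · exact (Bool.not_eq_true _).mp hxy
      · exact h.1 _ hz

theorem pvPairwise_sorted2 (ps : List (Int × Int)) :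
    (PySem.List.sorted2 ps Prod.fst Prod.snd).Pairwise pvR := by
  rw [pvSorted2_eq_foldl]
  suffices h : ∀ acc : List (Int × Int), acc.Pairwise pvR →
      (ps.foldl (fun acc x => PySem.List.insertBy pvLexB x acc) acc).Pairwise pvR by
    exact h [] (List.Pairwise.nil)
  induction ps with
  | nil => intro acc h; simpa using h
  | cons p ps ih => intro acc h; exact ih _ (pvPairwise_insertBy p acc h)

theorem pvR_fst_le {p q : Int × Int} (h : pvR p q) : p.1 ≤ q.1 := by
  rw [pvR_iff] at h; omega

theorem pvMem_pvPairs (xs : List Int) (q : Int × Int) :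
    q ∈ pvPairs xs ↔ ∃ k : Nat, ∃ _ : k < xs.length, q = (xs[k], (k : Int)) := by
  simp only [pvPairs, List.mem_map]
  constructor
  · rintro ⟨p, hp, rfl⟩
    rw [PySem.List.mem_enumerate_iff] at hp
    obtain ⟨k, hk, rfl⟩ := hp
    exact ⟨k, hk, by simp⟩
  · rintro ⟨k, hk, rfl⟩
    refine ⟨((k : Int), xs[k]), ?_, rfl⟩
    rw [PySem.List.mem_enumerate_iff]
    exact ⟨k, hk, by simp⟩

-- the structural characterisation of sorted2 of a row's (value, index) pairs
theorem pvSorted_pairs_shape (xs : List Int) (h2 : 2 ≤ xs.length) :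
    ∃ a b t, PySem.List.sorted2 (pvPairs xs) Prod.fst Prod.snd = a :: b :: t ∧
      (∃ k : Nat, ∃ _ : k < xs.length, a = (xs[k], (k : Int))) ∧
      (∃ k : Nat, ∃ _ : k < xs.length, b = (xs[k], (k : Int))) ∧
      a.2 ≠ b.2 ∧
      (∀ j : Nat, (h : j < xs.length) → a.1 ≤ xs[j]) ∧
      (∀ j : Nat, (h : j < xs.length) → (j : Int) ≠ a.2 → b.1 ≤ xs[j]) := by
  have hperm := PySem.List.sorted2_perm (pvPairs xs) Prod.fst Prod.snd false
  have hpw := pvPairwise_sorted2 (pvPairs xs)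
  have hlen : (PySem.List.sorted2 (pvPairs xs) Prod.fst Prod.snd).length = xs.length := by
    rw [hperm.length_eq, pvPairs, List.length_map, PySem.List.length_enumerate]
  cases hS : PySem.List.sorted2 (pvPairs xs) Prod.fst Prod.snd with
  | nil => rw [hS] at hlen; simp at hlen; omega
  | cons a rest =>
    cases rest with
    | nil => rw [hS] at hlen; simp at hlen; omega
    | cons b t =>
      rw [hS] at hperm hpw
      have hmem : ∀ q : Int × Int, q ∈ a :: b :: t ↔ q ∈ pvPairs xs := fun q => hperm.mem_iff
      have hpwa := (List.pairwise_cons.mp hpw)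
      have hpwb := (List.pairwise_cons.mp hpwa.2)
      -- a and b have the (xs[k], k) shape
      obtain ⟨ka, hka, ha⟩ := (pvMem_pvPairs xs a).mp ((hmem a).mp (List.mem_cons_self))
      obtain ⟨kb, hkb, hb⟩ := (pvMem_pvPairs xs b).mp
        ((hmem b).mp (List.mem_cons_of_mem _ (List.mem_cons_self)))
      -- distinct colors
      have hsnd : a.2 ≠ b.2 := by
        have hnd : ((pvPairs xs).map Prod.snd).Nodup := by
          have : (pvPairs xs).map Prod.snd = PySem.List.pyRange 0 (0 + (xs.length : Int)) 1 := by
            rw [pvPairs, List.map_map]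
            exact PySem.List.map_fst_enumerate xs 0
          rw [this]; exact PySem.List.nodup_pyRange_one _ _
        have hnd2 : ((a :: b :: t).map Prod.snd).Nodup := ((hperm.map Prod.snd).nodup_iff).mpr hnd
        simp only [List.map_cons, List.nodup_cons, List.mem_cons, List.mem_map] at hnd2
        intro hab
        exact hnd2.1 (Or.inl hab)
      refine ⟨a, b, t, rfl, ⟨ka, hka, ha⟩, ⟨kb, hkb, hb⟩, hsnd, ?_, ?_⟩
      · intro j hj
        have hp : ((xs[j], (j : Int)) : Int × Int) ∈ a :: b :: t :=
          (hmem _).mpr ((pvMem_pvPairs xs _).mpr ⟨j, hj, rfl⟩)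
        rcases List.mem_cons.mp hp with hpa | hp2
        · rw [← hpa]
        · have := pvR_fst_le (hpwa.1 _ hp2)
          simpa using this
      · intro j hj hja
        have hp : ((xs[j], (j : Int)) : Int × Int) ∈ a :: b :: t :=
          (hmem _).mpr ((pvMem_pvPairs xs _).mpr ⟨j, hj, rfl⟩)
        rcases List.mem_cons.mp hp with hpa | hp2
        · exfalso; apply hja; rw [← hpa]
        · rcases List.mem_cons.mp hp2 with hpb | hp3
          · rw [← hpb]
          · have := pvR_fst_le (hpwb.1 _ hp3)
            simpa using this

theorem pvTwoSmallest_min (xs : List Int) (h2 : 2 ≤ xs.length) :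
    (pvTwoSmallest (pvPairs xs)).1.1 = (PySem.List.min? xs (fun x => x)).getD 0 := by
  obtain ⟨a, b, t, hs, ⟨ka, hka, ha⟩, _, _, hbound, _⟩ := pvSorted_pairs_shape xs h2
  rw [pvTwoSmallest, hs]
  cases hm : PySem.List.min? xs (fun x => x) with
  | none =>
    rw [PySem.List.min?_eq_none_iff] at hm
    subst hm; simp at h2
  | some m =>
    have hmem := PySem.List.min?_mem hm
    have hmin := PySem.List.min?_isMin hm
    obtain ⟨j, hj, hjm⟩ := List.mem_iff_getElem.mp hmem
    have h1 : a.1 ≤ m := by rw [← hjm]; exact hbound j hj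
    have h2' : m ≤ a.1 := by
      have : xs[ka] ∈ xs := List.getElem_mem hka
      have := hmin _ this
      rw [ha]; exact this
    simp only [Option.getD_some]
    omega

theorem pvTwoSmallest_mn (xs : List Int) (h2 : 2 ≤ xs.length) (c : Int) :
    (if (pvTwoSmallest (pvPairs xs)).1.2 ≠ c then (pvTwoSmallest (pvPairs xs)).1.1
     else (pvTwoSmallest (pvPairs xs)).2.1) = pvMinOther xs c := by
  obtain ⟨a, b, t, hs, ⟨ka, hka, ha⟩, ⟨kb, hkb, hb⟩, hab, hbA, hbB⟩ := pvSorted_pairs_shape xs h2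
  rw [pvTwoSmallest, hs]
  simp only []
  -- the scanned list of B's inner generator
  set L := (((PySem.List.pyRange 0 (xs.length : Int) 1).filter (fun j => j ≠ c)).map
      (fun j => PySem.List.pyGetD xs j 0)) with hL
  have hmemL : ∀ y, y ∈ L ↔ ∃ j : Nat, ∃ _ : j < xs.length, ((j : Int) ≠ c) ∧ y = xs[j] := by
    intro y
    rw [hL]
    simp only [List.mem_map, List.mem_filter, PySem.List.mem_pyRange_one]
    constructor
    · rintro ⟨j, ⟨⟨hj0, hjl⟩, hjc⟩, rfl⟩
      have hjn : j.toNat < xs.length := by omega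
      refine ⟨j.toNat, hjn, ?_, ?_⟩
      · simp only [decide_eq_true_iff] at hjc
        omega
      · rw [PySem.List.pyGetD_of_nonneg xs 0 hj0, List.getD_eq_getElem xs 0 hjn]
    · rintro ⟨j, hj, hjc, rfl⟩
      refine ⟨(j : Int), ⟨⟨by omega, by omega⟩, by simpa using hjc⟩, ?_⟩
      rw [PySem.List.pyGetD_of_nonneg xs 0 (by omega)]
      simp only [Int.toNat_natCast]
      rw [List.getD_eq_getElem xs 0 hj]
  -- the intended value v and its witness index
  have key : ∀ v : Int, v ∈ L → (∀ y ∈ L, v ≤ y) → v = pvMinOther xs c := by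
    intro v hv hvmin
    rw [pvMinOther, ← hL]
    cases hm : PySem.List.min? L (fun x => x) with
    | none =>
      rw [PySem.List.min?_eq_none_iff] at hm
      rw [hm] at hv; simp at hv
    | some m =>
      have h1 : v ≤ m := hvmin _ (PySem.List.min?_mem hm)
      have h2' : m ≤ v := PySem.List.min?_isMin hm _ hv
      simp only [Option.getD_some]
      omega
  by_cases hc : a.2 ≠ c
  · rw [if_pos hc]
    apply key
    · rw [hmemL]
      refine ⟨ka, hka, ?_, ?_⟩
      · rw [ha] at hc; simpa using hc
      · rw [ha]
    · intro y hy
      obtain ⟨j, hj, _, rfl⟩ := (hmemL y).mp hy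
      exact hbA j hj
  · rw [if_neg hc]
    rw [not_not] at hc
    apply key
    · rw [hmemL]
      refine ⟨kb, hkb, ?_, ?_⟩
      · intro heq
        apply hab
        rw [hc, ← heq, hb]
      · rw [hb]
    · intro y hy
      obtain ⟨j, hj, hjc, rfl⟩ := (hmemL y).mp hy
      exact hbB j hj (by rw [hc]; exact hjc)

theorem pvStep_pairs (prev row : List Int) (h2 : 2 ≤ prev.length) :
    ((PySem.List.enumerate row).map
      (fun p => (p.2 + (if (pvTwoSmallest (pvPairs prev)).1.2 ≠ p.1
                        then (pvTwoSmallest (pvPairs prev)).1.1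
                        else (pvTwoSmallest (pvPairs prev)).2.1), p.1)))
    = pvPairs ((PySem.List.pyRange 0 row.length 1).map
        (fun c => PySem.List.pyGetD row c 0 + pvMinOther prev c)) := by
  apply List.ext_getElem
  · simp only [List.length_map, PySem.List.length_enumerate, pvPairs,
      PySem.List.length_pyRange_one]
    omega
  · intro k hk1 hk2
    have hkr : k < row.length := by
      simpa [PySem.List.length_enumerate] using hk1
    simp only [pvPairs, List.getElem_map, PySem.List.getElem_enumerate,
      PySem.List.getElem_pyRange_one, zero_add]
    simp only [show List.map (fun p => ((p : Int × Int).2, p.1)) (PySem.List.enumerate prev)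
          = pvPairs prev from rfl]
    rw [PySem.List.pyGetD_of_nonneg row 0 (by omega), Int.toNat_natCast,
      List.getD_eq_getElem row 0 hkr, pvTwoSmallest_mn prev h2 (k : Int)]

theorem pvLoop_eq (rows : List (List Int)) (prev : List Int) (h2 : 2 ≤ prev.length)
    (hr : ∀ r ∈ rows, 2 ≤ r.length) :
    (rows.foldl
      (fun m row => pvTwoSmallest ((PySem.List.enumerate row).map
          (fun p => (p.2 + (if m.1.2 ≠ p.1 then m.1.1 else m.2.1), p.1))))
      (pvTwoSmallest (pvPairs prev))).1.1
    = (PySem.List.min? (rows.foldl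
        (fun prev row => (PySem.List.pyRange 0 row.length 1).map
          (fun c => PySem.List.pyGetD row c 0 + pvMinOther prev c)) prev)
        (fun x => x)).getD 0 := by
  induction rows generalizing prev with
  | nil => exact pvTwoSmallest_min prev h2
  | cons r rows ih =>
    simp only [List.foldl_cons]
    rw [pvStep_pairs prev r h2]
    have hlen : 2 ≤ ((PySem.List.pyRange 0 r.length 1).map
        (fun c => PySem.List.pyGetD r c 0 + pvMinOther prev c)).length := by
      rw [List.length_map, PySem.List.length_pyRange_one]
      have := hr r (List.mem_cons_self)
      omega
    exact ih _ hlen (fun x hx => hr x (List.mem_cons_of_mem _ hx))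

-- ===== VERDICT (by name: the statement is the Claim_ definition above) =====
theorem walls_coloring_spec : Claim_equal_walls_coloring := by
  intro cost _ hpre
  unfold Spec_walls_coloring walls_coloring walls_coloring_alt
  by_cases hg1 : (cost.length == 0 || cost.headI.length == 0) = true
  · rw [if_pos hg1, if_pos hg1]
  rw [if_neg hg1, if_neg hg1]
  by_cases hg2 : (cost.headI.length == 1) = true
  · rw [if_pos hg2, if_pos hg2]
  rw [if_neg hg2, if_neg hg2]
  simp only [Bool.or_eq_true, beq_iff_eq, not_or] at hg1 hg2
  have hne : cost ≠ [] := by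
    intro h; exact hg1.1 (by rw [h]; rfl)
  have h2 : 2 ≤ cost.headI.length := by omega
  have hall : ∀ r ∈ cost, 2 ≤ r.length := by
    rcases hpre with h | h | h
    · exact absurd h hne
    · omega
    · exact h
  rw [PySem.List.slice_from cost (by norm_num : (0:Int) ≤ 1)]
  rw [PySem.List.foldl_pyRange_pyGetD' cost []
    (fun m row => pvTwoSmallest ((PySem.List.enumerate row).map
      (fun p => (p.2 + (if m.1.2 ≠ p.1 then m.1.1 else m.2.1), p.1))))
    (pvTwoSmallest (pvPairs cost.headI)) (by norm_num : (0:Int) ≤ 1)]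
  simp only [Int.toNat_one]
  exact pvLoop_eq (cost.drop 1) cost.headI h2
    (fun r hr => hall r (List.mem_of_mem_drop hr))
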